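-- pv_equiv track=rewrite | github.com/adedavid/word_manip | word_manip.py | sep_words
-- ===== SOURCE A (Python) =====
-- def sep_words(userstr_in) :
--     ''' takes in a string and returns a list of lists containing
--     sentences parsed out into words'''
--     str_in = userstr_in.split(" ")
--     str_in = userstr_in.split(" ")
--     s_end = 0 # to count the number of sentences
--     outer_list = []
--     inner_list = []
--
--     for word in str_in :
--
--         wordlen = len(word)
--         delimiter_list = ['?','!','.',] #sentence terminator
--
--         if len(word) != 0 : # to avoid calculating the lenght of a whitespace character
--             delimiter = word[wordlen - 1]# since index begins at zero, wordlen needs adjustment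
--             if delimiter in delimiter_list :
--                 word = word.strip(delimiter) #delimiter is removed from word
--                 inner_list.append(word)
--                 inner_list.append(delimiter)
--                 outer_list.insert(s_end, inner_list) #inner_list is formed when delimiter is found
--                 s_end += 1
--                 inner_list = []  # inner_list is initialized for the next sentence to begin
--             else:
--                 inner_list.append(word) #if no delimiter is found, words are appended straight away
--         else:
--             inner_list.append(word)
--     if len(inner_list) == 0 :  #this ensures we dont have inner list with empty element
--         pass
--     else:
--         s_end += 1
--         outer_list.insert(s_end, inner_list)
--
--     return outer_list
-- ===== SOURCE B (Python) =====
-- def _chunks(words):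
--     # find first word ending in a sentence terminator
--     for i, w in enumerate(words):
--         if w and w[-1] in '?!.':
--             d = w[-1]
--             return [words[:i] + [w.strip(d), d]] + _chunks(words[i + 1:])
--     return [words] if words else []
--
--
-- def sep_words(userstr_in):
--     '''takes in a string and returns a list of lists containing
--     sentences parsed out into words'''
--     return _chunks(userstr_in.split(" "))
-- ===== Notes on version B (the rewrite author's own statement) =====
-- stated objective: simpler
-- what changed: A's single-pass loop threading an outer/inner accumulator pair plus a final flush is replaced by a recursive decomposition that slices the word list at the first terminator word and recurses on the tail.
import Mathlib
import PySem

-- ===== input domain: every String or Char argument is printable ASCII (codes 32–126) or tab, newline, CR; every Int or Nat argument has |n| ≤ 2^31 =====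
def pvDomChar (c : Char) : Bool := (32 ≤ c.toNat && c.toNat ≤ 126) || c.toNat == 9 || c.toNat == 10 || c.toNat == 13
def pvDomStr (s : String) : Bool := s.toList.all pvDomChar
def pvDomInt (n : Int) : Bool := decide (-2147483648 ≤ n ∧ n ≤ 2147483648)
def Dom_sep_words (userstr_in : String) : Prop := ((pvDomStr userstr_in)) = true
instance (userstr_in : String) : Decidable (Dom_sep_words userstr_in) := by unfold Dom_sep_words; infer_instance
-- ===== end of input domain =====

-- B re-implements A's single-pass accumulator loop as a recursive split-at-first-terminator
-- decomposition (objective: simpler); return values proved equal on all inputs.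

-- ===== PORT A =====
-- one step of A's `for word in str_in` loop; state = (outer_list, inner_list);
-- `outer_list.insert(s_end, inner_list)` with s_end = len(outer_list) is an append
def sepAStep (st : List (List String) × List String) (word : String) :
    List (List String) × List String :=
  let outer := st.1
  let inner := st.2
  let wordlen := PySem.Str.len word
  let delimiter_list : List Char := ['?', '!', '.']
  if PySem.Str.len word ≠ 0 then
    -- the branch guard makes word[wordlen-1] in range, so `.getD ' '` never fires
    let delimiter := (PySem.Str.pyGet? word ((wordlen : Int) - 1)).getD ' '
    if delimiter ∈ delimiter_list then
      (outer ++ [inner ++ [PySem.Str.stripChars word (String.mk [delimiter]),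
                           String.mk [delimiter]]], [])
    else
      (outer, inner ++ [word])
  else
    (outer, inner ++ [word])

def sep_words (userstr_in : String) : List (List String) :=
  -- `userstr_in.split(" ")` (the duplicated line in A just rebinds the same value)
  let str_in := (PySem.Str.split? userstr_in " ").getD []
  let res := str_in.foldl sepAStep ([], [])
  if res.2.length = 0 then res.1 else res.1 ++ [res.2]

-- ===== PORT B =====
-- `w and w[-1] in '?!.'`
def isTermWord (w : String) : Bool :=
  w.toList ≠ [] && (PySem.List.pyGet? w.toList (-1)).getD ' ' ∈ (['?', '!', '.'] : List Char)

-- Source B `_chunks`: slice at the first terminator word and recurse on the tail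
def sepChunks (words : List String) : List (List String) :=
  match h : words.findIdx? isTermWord with
  | some i =>
    let w := (words[i]?).getD ""
    let d := (PySem.List.pyGet? w.toList (-1)).getD ' '
    (words.take i ++ [PySem.Str.stripChars w (String.mk [d]), String.mk [d]]) ::
      sepChunks (words.drop (i + 1))
  | none => if words = [] then [] else [words]
termination_by words.length
decreasing_by
  have hi : i < words.length := by
    rcases List.findIdx?_eq_some_iff_getElem.mp h with ⟨hlt, _⟩
    exact hlt
  simp [List.length_drop]
  omega

def sep_words_alt (userstr_in : String) : List (List String) :=
  sepChunks ((PySem.Str.split? userstr_in " ").getD [])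

-- ===== PRECONDITION & SPEC =====
def Spec_sep_words (userstr_in : String) (out : List (List String)) : Prop := out = sep_words_alt userstr_in
instance (userstr_in : String) (out : List (List String)) : Decidable (Spec_sep_words userstr_in out) := by unfold Spec_sep_words; infer_instance

-- ===== CLAIM (what is proved, stated in full; the proofs are below) =====
def Claim_equal_sep_words : Prop := ∀ (userstr_in : String), Dom_sep_words userstr_in → Spec_sep_words userstr_in (sep_words userstr_in)

-- ===== LEMMAS AND PROOFS =====

-- common reference shape of both programs' result
def gSep (inner : List String) : List String → List (List String)
  | [] => if inner = [] then [] else [inner]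
  | w :: rest =>
    if isTermWord w then
      let d := (PySem.List.pyGet? w.toList (-1)).getD ' '
      (inner ++ [PySem.Str.stripChars w (String.mk [d]), String.mk [d]]) :: gSep [] rest
    else
      gSep (inner ++ [w]) rest

theorem pyGet_last (l : List Char) (h : l ≠ []) :
    PySem.List.pyGet? l ((l.length : Int) - 1) = PySem.List.pyGet? l (-1) := by
  have hl : 0 < l.length := List.length_pos_iff.mpr h
  rw [PySem.List.pyGet?_neg_one, PySem.List.pyGet?_of_nonneg l (i := (l.length : Int) - 1) (by omega)]
  have ht : ((l.length : Int) - 1).toNat = l.length - 1 := by omega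
  rw [ht, List.getLast?_eq_getElem?]

theorem stepA_eq (outer : List (List String)) (inner : List String) (w : String) :
    sepAStep (outer, inner) w =
      if isTermWord w then
        let d := (PySem.List.pyGet? w.toList (-1)).getD ' '
        (outer ++ [inner ++ [PySem.Str.stripChars w (String.mk [d]), String.mk [d]]], [])
      else (outer, inner ++ [w]) := by
  by_cases hw : w.toList = []
  · simp [sepAStep, isTermWord, PySem.Str.len, PySem.Chars.len, hw]
  · have hlen : w.toList.length ≠ 0 := by simpa [List.length_eq_zero_iff] using hw
    simp only [sepAStep, isTermWord, PySem.Str.len, PySem.Chars.len, PySem.Str.pyGet?_eq,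
      PySem.Chars.pyGet?_eq_listPyGet?, hw, hlen, pyGet_last w.toList hw,
      ne_eq, not_false_eq_true, if_true, decide_true, Bool.true_and]
    split <;> simp_all

theorem foldl_gSep (ws : List String) :
    ∀ (outer : List (List String)) (inner : List String),
      (if (ws.foldl sepAStep (outer, inner)).2.length = 0
        then (ws.foldl sepAStep (outer, inner)).1
        else (ws.foldl sepAStep (outer, inner)).1 ++ [(ws.foldl sepAStep (outer, inner)).2])
      = outer ++ gSep inner ws := by
  induction ws with
  | nil =>
    intro outer inner
    by_cases h : inner = [] <;>
      simp [gSep, h, List.length_eq_zero_iff]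
  | cons w rest ih =>
    intro outer inner
    simp only [List.foldl_cons, stepA_eq]
    by_cases ht : isTermWord w
    · simp only [ht, if_true, gSep, ih, List.append_assoc, List.singleton_append]
    · have hf : isTermWord w = false := by simpa using ht
      simp only [gSep, hf, Bool.false_eq_true, if_false]
      exact ih outer (inner ++ [w])

theorem gSep_no_term (pre : List String) :
    ∀ (inner : List String) (rest : List String),
      (∀ x ∈ pre, isTermWord x = false) →
      gSep inner (pre ++ rest) = gSep (inner ++ pre) rest := by
  induction pre with
  | nil => intro inner rest _; simp
  | cons p ps ih =>
    intro inner rest hall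
    have hp : isTermWord p = false := hall p (by simp)
    simp only [List.cons_append, gSep, hp, Bool.false_eq_true, if_false]
    rw [ih (inner ++ [p]) rest (fun x hx => hall x (by simp [hx]))]
    simp

theorem sepChunks_eq_gSep (words : List String) : sepChunks words = gSep [] words := by
  induction words using sepChunks.induct with
  | case1 words i h ih =>
    rcases List.findIdx?_eq_some_iff_getElem.mp h with ⟨hlt, hterm, hbefore⟩
    have hdecomp : words = words.take i ++ words[i] :: words.drop (i + 1) := by
      rw [List.getElem_cons_drop hlt, List.take_append_drop]
    rw [sepChunks]
    have htake : ∀ x ∈ words.take i, isTermWord x = false := by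
      intro x hx
      rcases List.mem_take_iff_getElem.mp hx with ⟨j, hj, rfl⟩
      exact Bool.not_eq_true _ ▸ hbefore j (by omega)
    split
    case h_2 h' => rw [h] at h'; cases h'
    case h_1 i' h' =>
      rw [h] at h'
      injection h' with hii
      subst hii
      simp only [List.getElem?_eq_getElem hlt, Option.getD_some]
      conv_rhs => rw [hdecomp]
      rw [gSep_no_term (words.take i) [] (words[i] :: words.drop (i + 1)) htake]
      simp only [List.nil_append, gSep, hterm, if_true, ih]
  | case2 h =>
    rw [sepChunks]
    simp [gSep]
  | case3 words h hne =>
    rw [sepChunks]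
    have hall : ∀ x ∈ words, isTermWord x = false := List.findIdx?_eq_none_iff.mp h
    have hg : gSep [] (words ++ []) = gSep ([] ++ words) [] := gSep_no_term words [] [] hall
    simp only [List.append_nil, List.nil_append] at hg
    split
    case h_1 i' h' => rw [h] at h'; cases h'
    case h_2 h' =>
      rw [hg, gSep, if_neg hne]

-- ===== VERDICT (by name: the statement is the Claim_ definition above) =====
theorem sep_words_spec : Claim_equal_sep_words := by
  intro s _
  unfold Spec_sep_words sep_words sep_words_alt
  rw [sepChunks_eq_gSep]
  exact foldl_gSep _ [] []
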